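-- pv_equiv track=rewrite | github.com/sndrtj/wisestork | consam2.py | get_bins
-- ===== SOURCE A (Python) =====
-- def get_bins(chromosome_length, binsize):
--     """
--     Get list of 2-tuples of start and end positions of bins for a given chromosome
--     :param chromosome_length: integer
--     :param binsize: integer
--     :return: list of 2-tuples of (start, end). Start = 0-based
--     """
--
--     starts = list(range(0, chromosome_length, binsize))
--     ends = []
--     for s in starts:
--         if s + binsize < chromosome_length:
--             ends.append(s+binsize)
--         else:
--             ends.append(chromosome_length)
--     return [(s, e) for s, e in zip(starts, ends)]
-- ===== SOURCE B (Python) =====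
-- def get_bins(chromosome_length, binsize):
--     """Build the bin list back to front: the last bin starts at
--     (chromosome_length - 1) // binsize * binsize and ends at chromosome_length;
--     every earlier bin ends exactly where the bin after it starts."""
--     if binsize <= 0 or chromosome_length <= 0:
--         return []
--     bins = []
--     end = chromosome_length
--     start = (chromosome_length - 1) // binsize * binsize
--     while start >= 0:
--         bins.append((start, end))
--         end = start
--         start -= binsize
--     bins.reverse()
--     return bins
-- ===== Notes on version B (the rewrite author's own statement) =====
-- stated objective: alternative
-- what changed: B replaces A's range/second-loop-with-branch/zip pipeline by a back-to-front construction: it locates the last bin's start with floor division, walks downwards emitting each bin whose end is the previously emitted bin's start, then reverses once; no range list and no per-bin conditional.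
-- outside the precondition, e.g. on get_bins(-5, -2): A returns [(0, -5), (-2, -5), (-4, -6)], B returns []
import Mathlib
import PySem

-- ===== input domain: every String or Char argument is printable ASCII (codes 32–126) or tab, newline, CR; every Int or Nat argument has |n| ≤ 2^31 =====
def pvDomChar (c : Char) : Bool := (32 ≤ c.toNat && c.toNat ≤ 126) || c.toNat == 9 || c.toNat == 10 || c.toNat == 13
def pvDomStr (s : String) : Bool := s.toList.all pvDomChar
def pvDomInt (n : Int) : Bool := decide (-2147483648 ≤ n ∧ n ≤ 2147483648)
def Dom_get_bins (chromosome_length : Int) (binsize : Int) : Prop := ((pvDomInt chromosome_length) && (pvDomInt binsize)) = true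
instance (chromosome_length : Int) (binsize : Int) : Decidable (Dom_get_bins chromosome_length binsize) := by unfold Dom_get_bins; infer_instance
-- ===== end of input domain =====

-- B builds the bin list back to front (last bin by floor division, each earlier bin
-- ends where the next starts, one final reverse) instead of A's range/branch-loop/zip.

-- ===== PORT A =====
def get_bins (chromosome_length : Int) (binsize : Int) : List (Int × Int) :=
  let starts := PySem.List.pyRange 0 chromosome_length binsize
  let ends := starts.foldl
    (fun acc s =>
      if s + binsize < chromosome_length then acc ++ [s + binsize]
      else acc ++ [chromosome_length]) []
  (starts.zip ends).map (fun se => (se.1, se.2))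

-- ===== PORT B =====
-- B's while loop: 'hb : 0 < binsize' only justifies termination (the loop runs only in
-- the branch where the guard 'binsize <= 0' failed); the computation is the Python's.
def get_bins_alt_go (binsize : Int) (hb : 0 < binsize) (start endv : Int)
    (bins : List (Int × Int)) : List (Int × Int) :=
  if h : 0 ≤ start then
    get_bins_alt_go binsize hb (start - binsize) start (bins ++ [(start, endv)])
  else bins
termination_by (start + binsize).toNat
decreasing_by omega

def get_bins_alt (chromosome_length : Int) (binsize : Int) : List (Int × Int) :=
  if h : binsize ≤ 0 ∨ chromosome_length ≤ 0 then []
  else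
    (get_bins_alt_go binsize (by omega)
      (PySem.Int.floordiv (chromosome_length - 1) binsize * binsize)
      chromosome_length []).reverse

-- ===== PRECONDITION & SPEC =====
-- Pre_ excludes binsize = 0, where Python's range raises ValueError, and the corner
-- binsize < 0 ∧ chromosome_length < 0, where A's backward "bins" with ends before
-- starts are an accident of its range/branch code and no caller would specify either
-- behaviour; B naturally returns [] for a non-positive binsize.
def Pre_get_bins (chromosome_length : Int) (binsize : Int) : Prop :=
  0 < binsize ∨ (binsize < 0 ∧ 0 ≤ chromosome_length)
instance (chromosome_length : Int) (binsize : Int) : Decidable (Pre_get_bins chromosome_length binsize) := by unfold Pre_get_bins; infer_instance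
def pvWitness_get_bins : Int × Int := (10, 3)

def Spec_get_bins (chromosome_length : Int) (binsize : Int) (out : List (Int × Int)) : Prop := out = get_bins_alt chromosome_length binsize
instance (chromosome_length : Int) (binsize : Int) (out : List (Int × Int)) : Decidable (Spec_get_bins chromosome_length binsize out) := by unfold Spec_get_bins; infer_instance

-- ===== CLAIM (what is proved, stated in full; the proofs are below) =====
def Claim_equal_get_bins : Prop := ∀ (chromosome_length : Int) (binsize : Int), Dom_get_bins chromosome_length binsize → Pre_get_bins chromosome_length binsize → Spec_get_bins chromosome_length binsize (get_bins chromosome_length binsize)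

-- ===== LEMMAS AND PROOFS =====

-- A's result is each start paired with min (start + binsize) chromosome_length.
theorem pv_A_eq_map (L b : Int) :
    get_bins L b
      = (PySem.List.pyRange 0 L b).map (fun s => (s, min (s + b) L)) := by
  unfold get_bins
  have h1 : ∀ (acc : List Int),
      (PySem.List.pyRange 0 L b).foldl
        (fun acc s => if s + b < L then acc ++ [s + b] else acc ++ [L]) acc
        = acc ++ (PySem.List.pyRange 0 L b).map (fun s => min (s + b) L) := by
    intro acc
    rw [← PySem.List.foldl_append_singleton_eq_map
      (fun s : Int => min (s + b) L) (PySem.List.pyRange 0 L b) acc]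
    apply PySem.List.foldl_congr_mem
    intro a x _
    by_cases hlt : x + b < L
    · rw [if_pos hlt, min_eq_left (le_of_lt hlt)]
    · rw [if_neg hlt, min_eq_right (le_of_not_gt hlt)]
  simp only [h1, List.nil_append, ← List.map_prod_left_eq_zip, List.map_map]
  rfl

-- empty case of A: a negative step with a nonnegative stop gives an empty range
theorem pv_pyRange_neg_nonneg (L b : Int) (hb : b < 0) (hL : 0 ≤ L) :
    PySem.List.pyRange 0 L b = [] := by
  simp [PySem.List.pyRange, show ¬ b = 0 by omega, show ¬ 0 < b by omega,
    show ¬ L < 0 by omega]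

-- the while loop appends to its accumulator
theorem pv_go_acc (b : Int) (hb : 0 < b) (s e : Int) (acc : List (Int × Int)) :
    get_bins_alt_go b hb s e acc = acc ++ get_bins_alt_go b hb s e [] := by
  by_cases h : 0 ≤ s
  · conv_lhs => rw [get_bins_alt_go]
    conv_rhs => rw [get_bins_alt_go]
    rw [dif_pos h, dif_pos h,
        pv_go_acc b hb (s - b) s (acc ++ [(s, e)]),
        pv_go_acc b hb (s - b) s ([] ++ [(s, e)])]
    simp
  · conv_lhs => rw [get_bins_alt_go]
    conv_rhs => rw [get_bins_alt_go]
    rw [dif_neg h, dif_neg h]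
    simp
termination_by (s + b).toNat
decreasing_by all_goals omega

-- the loop, started at a nonnegative multiple q*b with end e, reversed:
-- all full bins below q*b, then the final bin (q*b, e)
theorem pv_go_char (b : Int) (hb : 0 < b) (q : Nat) (e : Int) :
    (get_bins_alt_go b hb (b * q) e []).reverse
      = (PySem.List.pyRange 0 (b * q) b).map (fun x => (x, x + b)) ++ [(b * q, e)] := by
  induction q generalizing e with
  | zero =>
      rw [get_bins_alt_go, dif_pos (by simp)]
      rw [get_bins_alt_go, dif_neg (by omega)]
      simp [PySem.List.pyRange]
  | succ q ih =>
      have hq : (0 : Int) ≤ b * (q + 1 : Nat) := by positivity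
      rw [get_bins_alt_go, dif_pos hq, pv_go_acc]
      have hshift : b * ((q : Nat) + 1 : Nat) - b = b * (q : Nat) := by push_cast; ring
      rw [hshift, List.reverse_append, ih]
      -- range split: pyRange 0 (b*(q+1)) b = pyRange 0 (b*q) b ++ [b*q]
      have hrange : PySem.List.pyRange 0 (b * ((q : Nat) + 1 : Nat)) b
          = PySem.List.pyRange 0 (b * (q : Nat)) b ++ [b * (q : Nat)] := by
        rw [PySem.List.pyRange_of_pos 0 _ hb, PySem.List.pyRange_of_pos 0 _ hb]
        have hc1 : ((b * ((q : Nat) + 1 : Nat) - 0 + b - 1) / b) = (q : Int) + 1 := by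
          have : b * ((q : Nat) + 1 : Nat) - 0 + b - 1 = (b - 1) + ((q : Int) + 1) * b := by
            push_cast; ring
          rw [this, Int.add_mul_ediv_right _ _ (by omega),
              Int.ediv_eq_zero_of_lt (by omega) (by omega)]
          ring
        have hpos1 : (0 : Int) < b * ((q : Nat) + 1 : Nat) := by positivity
        rw [if_pos hpos1, hc1]
        by_cases hq0 : q = 0
        · subst hq0
          simp
        · have hpos2 : (0 : Int) < b * (q : Nat) := by
            have : 0 < (q : Int) := by exact_mod_cast Nat.pos_of_ne_zero hq0
            positivity
          have hc2 : ((b * (q : Nat) - 0 + b - 1) / b) = (q : Int) := by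
            have : b * (q : Nat) - 0 + b - 1 = (b - 1) + (q : Int) * b := by
              push_cast; ring
            rw [this, Int.add_mul_ediv_right _ _ (by omega),
                Int.ediv_eq_zero_of_lt (by omega) (by omega)]
            ring
          rw [if_pos hpos2, hc2]
          have hq1 : ((q : Int) + 1).toNat = (q : Int).toNat + 1 := by omega
          rw [hq1, Int.toNat_natCast, List.range_succ, List.map_append]
          simp
      rw [hrange, List.map_append]
      simp
      ring_nf

-- ===== VERDICT (by name: the statement is the Claim_ definition above) =====
theorem get_bins_spec : Claim_equal_get_bins := by
  intro L b _ hpre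
  unfold Spec_get_bins
  rw [pv_A_eq_map]
  rcases hpre with hb | ⟨hb, hL⟩
  · -- positive binsize
    by_cases hL : L ≤ 0
    · rw [get_bins_alt, dif_pos (Or.inr hL)]
      have : PySem.List.pyRange 0 L b = [] := by
        simp [PySem.List.pyRange, show ¬ b = 0 by omega, hb, show ¬ 0 < L by omega]
      simp [this]
    · push_neg at hL
      rw [get_bins_alt, dif_neg (by omega)]
      set q0 : Int := PySem.Int.floordiv (L - 1) b with hq0
      have hfd : q0 = (L - 1) / b := PySem.Int.floordiv_eq_ediv_of_pos hb
      have hq0nn : 0 ≤ q0 := by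
        rw [hfd]; exact Int.ediv_nonneg (by omega) (by omega)
      have hle : q0 * b ≤ L - 1 := by
        rw [hfd]; exact Int.ediv_mul_le (L - 1) (by omega)
      have hgt : L - 1 < (q0 + 1) * b := by
        rw [hfd]
        have := Int.emod_lt_of_pos (L - 1) hb
        have := Int.ediv_add_emod (L - 1) b
        nlinarith [Int.emod_nonneg (L - 1) (by omega : b ≠ 0)]
      have hcast : q0 * b = b * (q0.toNat : Int) := by
        rw [Int.toNat_of_nonneg hq0nn]; ring
      rw [hcast, pv_go_char b hb q0.toNat L]
      -- A's range splits at b * q0.toNat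
      have hrangeA : PySem.List.pyRange 0 L b
          = PySem.List.pyRange 0 (b * (q0.toNat : Int)) b ++ [b * (q0.toNat : Int)] := by
        rw [PySem.List.pyRange_of_pos 0 _ hb, PySem.List.pyRange_of_pos 0 _ hb]
        have hcA : ((L - 0 + b - 1) / b) = q0 + 1 := by
          have hdecomp : L - 0 + b - 1 = ((L - 1) % b) + (q0 + 1) * b := by
            rw [hfd]; linear_combination -Int.ediv_add_emod (L - 1) b
          rw [hdecomp, Int.add_mul_ediv_right _ _ (by omega),
              Int.ediv_eq_zero_of_lt (Int.emod_nonneg _ (by omega))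
                (Int.emod_lt_of_pos _ hb)]
          ring
        rw [if_pos (by omega : (0:Int) < L), hcA]
        rw [← hcast]
        by_cases hq00 : q0 = 0
        · simp [hq00]
        · have hposq : (0 : Int) < q0 * b := by
            have : 0 < q0 := by omega
            positivity
          have hcB : ((q0 * b - 0 + b - 1) / b) = q0 := by
            have : q0 * b - 0 + b - 1 = (b - 1) + q0 * b := by ring
            rw [this, Int.add_mul_ediv_right _ _ (by omega),
                Int.ediv_eq_zero_of_lt (by omega) (by omega)]
            ring
          rw [if_pos hposq, hcB]
          have hsucc : (q0 + 1).toNat = q0.toNat + 1 := by omega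
          rw [hsucc, List.range_succ, List.map_append]
          simp [Int.toNat_of_nonneg hq0nn]
          ring_nf
      rw [hrangeA, List.map_append]
      congr 1
      · -- every non-last start x has x + b < L, so min (x+b) L = x + b
        apply List.map_congr_left
        intro x hx
        have hx' := (PySem.List.mem_pyRange_iff_of_pos hb x).1 hx
        have : x + b < L := by
          rcases hx'.2.2 with ⟨k, hk⟩
          have hxle : x ≤ b * ((q0.toNat : Int) - 1) := by
            have hkb : x = b * k := by omega
            have hkpos : k < (q0.toNat : Int) := by nlinarith [hx'.2.1]
            nlinarith
          have : b * (q0.toNat : Int) ≤ L - 1 := by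
            rw [← hcast]; exact hle
          nlinarith
        simp [min_eq_left (le_of_lt this)]
      · -- last bin clamps to L
        have : ¬ (b * (q0.toNat : Int) + b < L) := by
          have : L - 1 < (q0 + 1) * b := hgt
          rw [Int.toNat_of_nonneg hq0nn]
          nlinarith
        have h2 : min (b * (q0.toNat : Int) + b) L = L := min_eq_right (by omega)
        simp only [List.map_cons, List.map_nil, h2]
  · -- negative binsize, nonnegative length: both sides empty
    rw [get_bins_alt, dif_pos (Or.inl (by omega)),
        pv_pyRange_neg_nonneg L b hb hL]
    simp
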